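-- pv_equiv track=rewrite | github.com/zznam/python_scripts | binarysearch.com/TaskHare.py | solve
-- ===== SOURCE A (Python) =====
-- def solve(tasks, people):
--     n = len(tasks)
--     m = len(people)
--     tasks.sort()
--     people.sort()
--     flagP = 0
--     ret = 0
--     for i in range(0, n):
--         while flagP < m and people[flagP] < tasks[i]:
--             flagP += 1
--         if (flagP < m):
--             if (people[flagP] >= tasks[i]):
--                 ret += 1
--                 flagP += 1
--         else:
--             break
--     return ret
-- ===== SOURCE B (Python) =====
-- def solve(tasks, people):
--     tasks.sort()
--     people.sort()
--     n, m = len(tasks), len(people)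
--
--     def ok(k):
--         # can the k easiest tasks be done by the k strongest people?
--         return all(tasks[i] <= people[m - k + i] for i in range(k))
--
--     lo, hi = 0, min(n, m)
--     while lo < hi:
--         mid = (lo + hi + 1) // 2
--         if ok(mid):
--             lo = mid
--         else:
--             hi = mid - 1
--     return lo
-- ===== Notes on version B (the rewrite author's own statement) =====
-- stated objective: alternative
-- what changed: B replaces A's sort-and-sweep greedy matching by a binary search on the answer k, each step checking the closed-form feasibility condition tasks[i] <= people[m-k+i] for all i < k (k easiest tasks vs k strongest people); no pointer sweep remains.
import Mathlib
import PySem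

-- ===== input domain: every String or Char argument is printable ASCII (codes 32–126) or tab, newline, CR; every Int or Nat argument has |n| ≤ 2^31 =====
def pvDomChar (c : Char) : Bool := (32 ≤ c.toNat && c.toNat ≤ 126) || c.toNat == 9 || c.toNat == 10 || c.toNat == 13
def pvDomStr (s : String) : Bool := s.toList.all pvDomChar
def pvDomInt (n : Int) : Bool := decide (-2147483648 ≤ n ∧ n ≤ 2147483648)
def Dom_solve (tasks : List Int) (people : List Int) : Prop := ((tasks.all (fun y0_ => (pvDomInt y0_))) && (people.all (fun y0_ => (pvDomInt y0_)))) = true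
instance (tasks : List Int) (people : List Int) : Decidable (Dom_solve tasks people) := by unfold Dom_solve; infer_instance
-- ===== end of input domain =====

-- B replaces A's sort-and-sweep greedy matching by a binary search on the answer k,
-- checking the closed-form feasibility 'tasks[i] <= people[m-k+i] for all i < k'
-- (objective: alternative). Both A and B sort their argument lists in place; the
-- equivalence proved here is about the return value.
-- The loops are ported as structural recursion on a fuel that provably covers every
-- iteration the Python loop performs; the fuel-0 case returns the loop state exactly
-- where the Python loop has already terminated.

-- ===== PORT A =====
-- the inner 'while flagP < m and people[flagP] < tasks[i]: flagP += 1'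
-- (fuel people.length ≥ the remaining iterations people.length - flagP)
def solveWhileF : Nat → List Int → Int → Nat → Nat
  | 0, _, _, flagP => flagP
  | fuel + 1, people, t, flagP =>
    if flagP < people.length ∧ people[flagP]! < t then solveWhileF fuel people t (flagP + 1)
    else flagP

-- the 'for i in range(0, n)' loop with state (flagP, ret); the break returns ret
-- (fuel ts.length ≥ the remaining iterations ts.length - i)
def solveLoopF : Nat → List Int → List Int → Nat → Nat → Int → Int
  | 0, _, _, _, _, ret => ret
  | fuel + 1, ts, ps, i, flagP, ret =>
    if i < ts.length then
      let f := solveWhileF ps.length ps ts[i]! flagP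
      if f < ps.length then
        if ps[f]! ≥ ts[i]! then solveLoopF fuel ts ps (i + 1) (f + 1) (ret + 1)
        else solveLoopF fuel ts ps (i + 1) f ret
      else ret
    else ret

def solve (tasks : List Int) (people : List Int) : Int :=
  let ts := PySem.List.sorted tasks (fun x => x) false
  let ps := PySem.List.sorted people (fun x => x) false
  solveLoopF ts.length ts ps 0 0 0

-- ===== PORT B =====
-- 'ok(k)': all(tasks[i] <= people[m - k + i] for i in range(k)); only called with
-- k ≤ min(n, m), where the Python index m - k + i is the same natural number as here
def okB (ts ps : List Int) (k : Nat) : Bool :=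
  (List.range k).all (fun i => decide (ts[i]! ≤ ps[ps.length - k + i]!))

-- the 'while lo < hi' binary search; 'mid = (lo + hi + 1) // 2' is inlined
-- (the interval [lo, hi] shrinks every iteration, so fuel hi - lo suffices)
def bsearchF : Nat → (Nat → Bool) → Nat → Nat → Nat
  | 0, _, lo, _ => lo
  | fuel + 1, ok, lo, hi =>
    if lo < hi then
      if ok ((lo + hi + 1) / 2) then bsearchF fuel ok ((lo + hi + 1) / 2) hi
      else bsearchF fuel ok lo ((lo + hi + 1) / 2 - 1)
    else lo

def solve_alt (tasks : List Int) (people : List Int) : Int :=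
  let ts := PySem.List.sorted tasks (fun x => x) false
  let ps := PySem.List.sorted people (fun x => x) false
  ((bsearchF (min ts.length ps.length) (okB ts ps) 0 (min ts.length ps.length) : Nat) : Int)

-- ===== PRECONDITION & SPEC =====
def Spec_solve (tasks : List Int) (people : List Int) (out : Int) : Prop := out = solve_alt tasks people
instance (tasks : List Int) (people : List Int) (out : Int) : Decidable (Spec_solve tasks people out) := by unfold Spec_solve; infer_instance

-- ===== CLAIM (what is proved, stated in full; the proofs are below) =====
def Claim_equal_solve : Prop := ∀ (tasks : List Int) (people : List Int), Dom_solve tasks people → Spec_solve tasks people (solve tasks people)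

-- ===== LEMMAS AND PROOFS =====

-- the greedy matching count both programs compute, as a recursion
def tp : List Int → List Int → Nat
  | [], _ => 0
  | _ :: _, [] => 0
  | t :: ts, p :: ps => if p < t then tp (t :: ts) ps else 1 + tp ts ps

-- ---- port A equals tp ----

theorem dropWhile_head_false (q : Int → Bool) (l : List Int) (x : Int) (l2 : List Int)
    (h : l.dropWhile q = x :: l2) : q x = false := by
  induction l with
  | nil => simp at h
  | cons a l ih =>
    rw [List.dropWhile_cons] at h
    by_cases hq : q a
    · exact ih (by simpa [hq] using h)
    · simp [hq] at h
      rw [h.1] at hq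
      simpa using hq

theorem solveWhileF_drop (people : List Int) (t : Int) (fuel flagP : Nat)
    (hfuel : people.length - flagP ≤ fuel) :
    people.drop (solveWhileF fuel people t flagP) =
      (people.drop flagP).dropWhile (fun p => decide (p < t)) := by
  induction fuel generalizing flagP with
  | zero =>
    have h1 : people.drop flagP = [] := List.drop_eq_nil_of_le (by omega)
    simp [solveWhileF, h1]
  | succ fuel ih =>
    simp only [solveWhileF]
    split
    · rename_i h
      rw [ih (flagP + 1) (by omega)]
      have hd : people.drop flagP = people[flagP] :: people.drop (flagP + 1) :=
        List.drop_eq_getElem_cons h.1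
      have hv : people[flagP]! = people[flagP] := getElem!_pos people flagP h.1
      have hlt : people[flagP] < t := by rw [← hv]; exact h.2
      rw [hd, List.dropWhile_cons]
      simp [hlt]
    · rename_i h
      rw [Decidable.not_and_iff_not_or_not] at h
      by_cases hl : flagP < people.length
      · have hd : people.drop flagP = people[flagP] :: people.drop (flagP + 1) :=
          List.drop_eq_getElem_cons hl
        have hv : people[flagP]! = people[flagP] := getElem!_pos people flagP hl
        have hle : ¬ people[flagP] < t := by
          rcases h with h | h
          · exact absurd hl h
          · rw [← hv]; exact h
        rw [hd, List.dropWhile_cons]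
        simp [hle]
      · have h1 : people.drop flagP = [] := List.drop_eq_nil_of_le (by omega)
        rw [h1, List.dropWhile_nil]

theorem tp_dropWhile (t : Int) (ts ps : List Int) :
    tp (t :: ts) ps =
      match (ps.dropWhile (fun p => decide (p < t))) with
      | [] => 0
      | _ :: ps' => 1 + tp ts ps' := by
  induction ps with
  | nil => simp [tp]
  | cons p ps ih =>
    rw [List.dropWhile_cons]
    by_cases h : p < t
    · simp [tp, h, ih]
    · simp [tp, h]

theorem solveLoopF_eq_tp (ts ps : List Int) (fuel i flagP : Nat) (ret : Int)
    (hfuel : ts.length - i ≤ fuel) :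
    solveLoopF fuel ts ps i flagP ret = ret + (tp (ts.drop i) (ps.drop flagP) : Int) := by
  induction fuel generalizing i flagP ret with
  | zero =>
    have h1 : ts.drop i = [] := List.drop_eq_nil_of_le (by omega)
    rw [h1]
    cases ps.drop flagP <;> simp [solveLoopF, tp]
  | succ fuel ih =>
    simp only [solveLoopF]
    split
    · rename_i hi
      have hts : ts.drop i = ts[i] :: ts.drop (i + 1) := List.drop_eq_getElem_cons hi
      have htsv : ts[i]! = ts[i] := getElem!_pos ts i hi
      rw [hts, tp_dropWhile, ← htsv]
      have hw := solveWhileF_drop ps ts[i]! ps.length flagP (by omega)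
      set f := solveWhileF ps.length ps ts[i]! flagP with hf
      by_cases hfl : f < ps.length
      · have hd : ps.drop f = ps[f] :: ps.drop (f + 1) := List.drop_eq_getElem_cons hfl
        have hpv : ps[f]! = ps[f] := getElem!_pos ps f hfl
        rw [hd] at hw
        have hge : ps[f]! ≥ ts[i]! := by
          have := dropWhile_head_false (fun p => decide (p < ts[i]!)) (ps.drop flagP) ps[f] (ps.drop (f + 1)) hw.symm
          simp only [decide_eq_false_iff_not, not_lt] at this
          rw [hpv]; exact this
        simp only [hfl, if_pos, hge]
        rw [ih (i + 1) (f + 1) (ret + 1) (by omega), ← hw]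
        push_cast
        ring
      · have hnil : ps.drop f = [] := List.drop_eq_nil_of_le (by omega)
        rw [hnil] at hw
        simp only [hfl, if_false]
        rw [← hw]
        simp
    · rename_i hi
      have h1 : ts.drop i = [] := List.drop_eq_nil_of_le (by omega)
      rw [h1]
      cases ps.drop flagP <;> simp [tp]

-- ---- tp is the largest feasible k ----

-- 'the k easiest tasks can be done by the k strongest people'
def OkP (ts ps : List Int) (k : Nat) : Prop :=
  k ≤ ts.length ∧ k ≤ ps.length ∧ ∀ i < k, ts[i]! ≤ ps[ps.length - k + i]!

theorem pairwise_getElem!_le (ps : List Int) (hps : ps.Pairwise (· ≤ ·))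
    (i j : Nat) (hij : i ≤ j) (hj : j < ps.length) : ps[i]! ≤ ps[j]! := by
  have hi : i < ps.length := lt_of_le_of_lt hij hj
  rw [getElem!_pos ps i hi, getElem!_pos ps j hj]
  rcases lt_or_eq_of_le hij with h | h
  · exact List.pairwise_iff_getElem.mp hps i j hi hj h
  · subst h; exact le_refl _

theorem tp_ok (ts ps : List Int) (hps : ps.Pairwise (· ≤ ·)) : OkP ts ps (tp ts ps) := by
  fun_induction tp ts ps with
  | case1 ps => exact ⟨Nat.zero_le _, Nat.zero_le _, by omega⟩
  | case2 t ts => exact ⟨Nat.zero_le _, Nat.zero_le _, by omega⟩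
  | case3 t ts p ps hlt ih =>
    obtain ⟨h1, h2, h3⟩ := ih (List.pairwise_cons.mp hps).2
    refine ⟨h1, by simp only [List.length_cons]; omega, ?_⟩
    intro i hi
    have hidx : ps.length + 1 - tp (t :: ts) ps + i = (ps.length - tp (t :: ts) ps + i) + 1 := by omega
    rw [show ((p :: ps).length = ps.length + 1) from rfl, hidx, List.getElem!_cons_succ]
    exact h3 i hi
  | case4 t ts p ps hlt ih =>
    obtain ⟨h1, h2, h3⟩ := ih (List.pairwise_cons.mp hps).2
    refine ⟨by simp only [List.length_cons]; omega, by simp only [List.length_cons]; omega, ?_⟩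
    intro i hi
    match i with
    | 0 =>
      have hidx : (p :: ps).length - (1 + tp ts ps) + 0 = ps.length - tp ts ps := by
        simp only [List.length_cons]; omega
      rw [hidx, List.getElem!_cons_zero]
      by_cases hg : tp ts ps < ps.length
      · have hj : ps.length - tp ts ps - 1 < ps.length := by omega
        have hstep : (ps.length - tp ts ps) = (ps.length - tp ts ps - 1) + 1 := by omega
        rw [hstep, List.getElem!_cons_succ, getElem!_pos ps _ hj]
        have hp : p ≤ ps[ps.length - tp ts ps - 1] :=
          (List.pairwise_cons.mp hps).1 _ (List.getElem_mem hj)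
        omega
      · have : ps.length - tp ts ps = 0 := by omega
        rw [this]
        simp only [List.getElem!_cons_zero]
        omega
    | i + 1 =>
      have hidx : (p :: ps).length - (1 + tp ts ps) + (i + 1) = (ps.length - tp ts ps + i) + 1 := by
        simp only [List.length_cons]; omega
      rw [hidx, List.getElem!_cons_succ, List.getElem!_cons_succ]
      exact h3 i (by omega)

theorem tp_max (ts ps : List Int) (k : Nat) (h : OkP ts ps k) : k ≤ tp ts ps := by
  fun_induction tp ts ps generalizing k with
  | case1 ps => exact h.1
  | case2 t ts => exact h.2.1
  | case3 t ts p ps hlt ih =>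
    obtain ⟨h1, h2, h3⟩ := h
    have hkm : k ≤ ps.length := by
      by_contra hk
      have hk' : k = ps.length + 1 := by simp only [List.length_cons] at h2; omega
      have := h3 0 (by omega)
      rw [show ((p :: ps).length - k + 0 = 0) from by simp only [List.length_cons]; omega] at this
      simp only [List.getElem!_cons_zero] at this
      omega
    refine ih k ⟨h1, hkm, ?_⟩
    intro i hi
    have := h3 i hi
    rw [show ((p :: ps).length - k + i = (ps.length - k + i) + 1) from by
        simp only [List.length_cons]; omega,
      List.getElem!_cons_succ] at this
    exact this
  | case4 t ts p ps hlt ih =>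
    obtain ⟨h1, h2, h3⟩ := h
    match k with
    | 0 => omega
    | j + 1 =>
      have hj : j ≤ tp ts ps := by
        refine ih j ⟨by simp only [List.length_cons] at h1; omega,
          by simp only [List.length_cons] at h2; omega, ?_⟩
        intro i hi
        have := h3 (i + 1) (by omega)
        rw [show ((p :: ps).length - (j + 1) + (i + 1) = (ps.length - j + i) + 1) from by
            simp only [List.length_cons]; omega,
          List.getElem!_cons_succ, List.getElem!_cons_succ] at this
        exact this
      omega

-- ---- the binary search finds the largest feasible k ----

theorem okB_iff (ts ps : List Int) (k : Nat) :
    okB ts ps k = true ↔ ∀ i < k, ts[i]! ≤ ps[ps.length - k + i]! := by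
  simp [okB]

theorem ok_chain (ok : Nat → Bool) (H : Nat)
    (mono : ∀ k, k + 1 ≤ H → ok (k + 1) = true → ok k = true)
    (j k : Nat) (hjk : j ≤ k) (hkH : k ≤ H) (hk : ok k = true) : ok j = true := by
  induction k with
  | zero => rwa [Nat.le_zero.mp hjk]
  | succ k ih =>
    rcases Nat.lt_or_ge j (k + 1) with h | h
    · exact ih (by omega) (by omega) (mono k hkH hk)
    · rwa [show j = k + 1 from by omega]

theorem bsearchF_spec (ok : Nat → Bool) (H : Nat)
    (mono : ∀ k, k + 1 ≤ H → ok (k + 1) = true → ok k = true)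
    (fuel lo hi : Nat) (hfuel : hi - lo ≤ fuel) (hlohi : lo ≤ hi) (hhiH : hi ≤ H)
    (hlo : ok lo = true) :
    ok (bsearchF fuel ok lo hi) = true ∧ bsearchF fuel ok lo hi ≤ hi ∧
      ∀ k, bsearchF fuel ok lo hi < k → k ≤ hi → ok k = false := by
  induction fuel generalizing lo hi with
  | zero =>
    refine ⟨hlo, hlohi, ?_⟩
    intro k hk1 hk2
    exact absurd rfl (by simp only [bsearchF] at hk1; omega : ¬ (0 : Nat) = 0)
  | succ fuel ih =>
    simp only [bsearchF]
    split
    · rename_i h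
      have hmid1 : lo < (lo + hi + 1) / 2 := by omega
      have hmid2 : (lo + hi + 1) / 2 ≤ hi := by omega
      split
      · rename_i hok
        exact ih _ hi (by omega) (by omega) hhiH hok
      · rename_i hnok
        obtain ⟨r1, r2, r3⟩ := ih lo ((lo + hi + 1) / 2 - 1) (by omega) (by omega) (by omega) hlo
        refine ⟨r1, by omega, ?_⟩
        intro k hk1 hk2
        rcases Nat.lt_or_ge ((lo + hi + 1) / 2 - 1) k with hcase | hcase
        · by_contra hkk
          have hk' : ok k = true := by
            cases hx : ok k
            · exact absurd hx hkk
            · rfl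
          have := ok_chain ok H mono ((lo + hi + 1) / 2) k (by omega) (hk2.trans hhiH) hk'
          simp [this] at hnok
        · exact r3 k hk1 hcase
    · rename_i h
      refine ⟨hlo, hlohi, ?_⟩
      intro k hk1 hk2
      exact absurd rfl (by omega : ¬ (0 : Nat) = 0)

theorem okB_mono (ts ps : List Int) (hps : ps.Pairwise (· ≤ ·)) (k : Nat)
    (hk : k + 1 ≤ min ts.length ps.length) (h : okB ts ps (k + 1) = true) :
    okB ts ps k = true := by
  rw [okB_iff] at h ⊢
  intro i hi
  have h1 := h i (by omega)
  have hstep : ps[ps.length - (k + 1) + i]! ≤ ps[ps.length - k + i]! := by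
    refine pairwise_getElem!_le ps hps _ _ (by omega) (by omega)
  exact h1.trans hstep

theorem bsearchF_eq_tp (ts ps : List Int) (hps : ps.Pairwise (· ≤ ·)) :
    bsearchF (min ts.length ps.length) (okB ts ps) 0 (min ts.length ps.length) = tp ts ps := by
  have mono : ∀ k, k + 1 ≤ min ts.length ps.length →
      okB ts ps (k + 1) = true → okB ts ps k = true :=
    fun k hk h => okB_mono ts ps hps k hk h
  have hok0 : okB ts ps 0 = true := by simp [okB]
  obtain ⟨r1, r2, r3⟩ :=
    bsearchF_spec (okB ts ps) (min ts.length ps.length) mono (min ts.length ps.length)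
      0 (min ts.length ps.length) (by omega) (Nat.zero_le _) (le_refl _) hok0
  have htp := tp_ok ts ps hps
  have htple : tp ts ps ≤ min ts.length ps.length := le_min htp.1 htp.2.1
  have htpok : okB ts ps (tp ts ps) = true := (okB_iff ts ps _).mpr htp.2.2
  have h1 : tp ts ps ≤ bsearchF (min ts.length ps.length) (okB ts ps) 0 (min ts.length ps.length) := by
    by_contra hc
    have := r3 (tp ts ps) (by omega) htple
    rw [this] at htpok
    exact Bool.false_ne_true htpok
  have h2 : bsearchF (min ts.length ps.length) (okB ts ps) 0 (min ts.length ps.length) ≤ tp ts ps :=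
    tp_max ts ps _ ⟨le_trans r2 (min_le_left _ _), le_trans r2 (min_le_right _ _),
      (okB_iff ts ps _).mp r1⟩
  omega

-- ===== VERDICT (by name: the statement is the Claim_ definition above) =====
theorem solve_spec : Claim_equal_solve := by
  intro tasks people _
  unfold Spec_solve solve solve_alt
  dsimp only
  rw [solveLoopF_eq_tp _ _ _ _ _ _ (by omega), bsearchF_eq_tp _ _
    (by simpa using PySem.List.sorted_pairwise people (fun x => x) )]
  simp
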